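-- pv_equiv track=rewrite | github.com/gyang274/leetcode | src/1063.num.valid.subarray.py | validSubarrays
-- ===== SOURCE A (Python) =====
-- from typing import List
--
-- def validSubarrays(nums: List[int]) -> int:
--   # O(N), monotonic stack
--   count, stack = 0, []
--   for x in nums:
--     while stack and stack[-1] > x:
--       stack.pop()
--     stack.append(x)
--     count += len(stack)
--   return count
-- ===== SOURCE B (Python) =====
-- def validSubarrays(nums):
--   # For each start i, count subarrays [i..j-1] where nums[i] stays the minimum.
--   total = 0
--   n = len(nums)
--   for i in range(n):
--     j = i
--     while j < n and nums[j] >= nums[i]: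
--       j += 1
--     total += j - i
--   return total
-- ===== Notes on version B (the rewrite author's own statement) =====
-- stated objective: alternative
-- what changed: Replaces the single-pass monotonic stack with a direct nested scan: for each start index it counts how far the run of elements >= nums[i] extends, maintaining no stack at all.
import Mathlib
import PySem

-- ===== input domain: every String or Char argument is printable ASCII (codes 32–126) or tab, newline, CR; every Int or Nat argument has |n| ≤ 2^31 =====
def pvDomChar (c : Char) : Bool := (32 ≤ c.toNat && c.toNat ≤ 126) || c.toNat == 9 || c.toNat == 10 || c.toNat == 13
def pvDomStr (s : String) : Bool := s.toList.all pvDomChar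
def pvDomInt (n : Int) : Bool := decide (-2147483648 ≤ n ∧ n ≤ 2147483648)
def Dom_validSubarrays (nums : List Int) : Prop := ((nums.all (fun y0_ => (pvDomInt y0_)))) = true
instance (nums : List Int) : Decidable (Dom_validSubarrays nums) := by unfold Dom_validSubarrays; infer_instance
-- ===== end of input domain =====

-- B replaces A's monotonic stack by a direct per-start nested scan (alternative algorithm, not faster).

-- ===== PORT A =====
-- Python's stack is ported with its TOP at the HEAD of the list (append = cons, stack[-1] = head,
-- pop = drop head, len unchanged); the inner `while stack and stack[-1] > x: stack.pop()` loop: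
def popGT (x : Int) : List Int → List Int
  | [] => []
  | t :: s => if t > x then popGT x s else t :: s

def stepA (st : Int × List Int) (x : Int) : Int × List Int :=
  let s := x :: popGT x st.2
  (st.1 + (s.length : Int), s)

def validSubarrays (nums : List Int) : Int :=
  (nums.foldl stepA (0, [])).1

-- ===== PORT B =====
-- inner `while j < n and nums[j] >= nums[i]` loop, returning j - i - 1 (steps past the start):
def runLen (x : Int) : List Int → Int
  | [] => 0
  | y :: ys => if y ≥ x then 1 + runLen x ys else 0

def validSubarrays_alt : List Int → Int
  | [] => 0
  | x :: xs => (1 + runLen x xs) + validSubarrays_alt xs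

-- ===== PRECONDITION & SPEC =====
def Spec_validSubarrays (nums : List Int) (out : Int) : Prop := out = validSubarrays_alt nums
instance (nums : List Int) (out : Int) : Decidable (Spec_validSubarrays nums out) := by unfold Spec_validSubarrays; infer_instance

-- ===== CLAIM (what is proved, stated in full; the proofs are below) =====
def Claim_equal_validSubarrays : Prop := ∀ (nums : List Int), Dom_validSubarrays nums → Spec_validSubarrays nums (validSubarrays nums)

-- ===== LEMMAS AND PROOFS =====

-- total future contribution of the stack elements: each survivor t of the stack is counted once
-- per remaining step while all scanned elements are ≥ t
def sumRun (s l : List Int) : Int := (s.map (fun t => runLen t l)).sum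

theorem sumRun_cons (t : Int) (s l : List Int) :
    sumRun (t :: s) l = runLen t l + sumRun s l := by
  simp [sumRun]

theorem mem_popGT {x t : Int} {s : List Int} (hs : s.Pairwise (· ≥ ·))
    (ht : t ∈ popGT x s) : t ≤ x := by
  induction s with
  | nil => simp [popGT] at ht
  | cons a rest ih =>
    rw [List.pairwise_cons] at hs
    by_cases h : a > x
    · simp only [popGT, if_pos h] at ht
      exact ih hs.2 ht
    · simp only [popGT, if_neg h] at ht
      rcases List.mem_cons.1 ht with h1 | h2
      · omega
      · have := hs.1 t h2; omega

theorem pairwise_popGT {x : Int} {s : List Int} (hs : s.Pairwise (· ≥ ·)) :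
    (popGT x s).Pairwise (· ≥ ·) := by
  induction s with
  | nil => exact hs
  | cons a rest ih =>
    rw [List.pairwise_cons] at hs
    by_cases h : a > x
    · simp only [popGT, if_pos h]; exact ih hs.2
    · simp only [popGT, if_neg h]
      exact List.pairwise_cons.2 hs

-- every element of the stack survives a step through an element ≥ all of them
theorem sumRun_cons_all_le {x : Int} {s : List Int} (l : List Int)
    (h : ∀ t ∈ s, t ≤ x) :
    sumRun s (x :: l) = (s.length : Int) + sumRun s l := by
  induction s with
  | nil => simp [sumRun]
  | cons a rest ih =>
    have ha : a ≤ x := h a (by simp)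
    rw [sumRun_cons, sumRun_cons, ih (fun t ht => h t (by simp [ht]))]
    simp only [runLen, if_pos (by omega : x ≥ a), List.length_cons]
    push_cast
    ring

-- one step of the scan: the popped elements (all > x) stop contributing, the rest carry on
theorem sumRun_step {x : Int} {s : List Int} (l : List Int)
    (hs : s.Pairwise (· ≥ ·)) :
    sumRun s (x :: l) = ((popGT x s).length : Int) + sumRun (popGT x s) l := by
  induction s with
  | nil => simp [popGT, sumRun]
  | cons a rest ih =>
    rw [List.pairwise_cons] at hs
    by_cases h : a > x
    · simp only [popGT, if_pos h]
      rw [sumRun_cons]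
      simp only [runLen, if_neg (by omega : ¬ x ≥ a)]
      rw [ih hs.2]; ring
    · simp only [popGT, if_neg h]
      have hall : ∀ t ∈ a :: rest, t ≤ x := by
        intro t ht
        rcases List.mem_cons.1 ht with h1 | h2
        · omega
        · have := hs.1 t h2; omega
      rw [sumRun_cons_all_le l hall]

theorem foldl_invariant (l : List Int) :
    ∀ (c : Int) (s : List Int), s.Pairwise (· ≥ ·) →
    (l.foldl stepA (c, s)).1 = c + sumRun s l + validSubarrays_alt l := by
  induction l with
  | nil => intro c s _; simp [sumRun, validSubarrays_alt, runLen]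
  | cons x xs ih =>
    intro c s hs
    have hpop : ∀ t ∈ popGT x s, t ≤ x := fun t ht => mem_popGT hs ht
    have hs' : (x :: popGT x s).Pairwise (· ≥ ·) :=
      List.pairwise_cons.2 ⟨fun t ht => by have := hpop t ht; omega, pairwise_popGT hs⟩
    simp only [List.foldl_cons]
    rw [show stepA (c, s) x = (c + ((x :: popGT x s).length : Int), x :: popGT x s) from rfl]
    rw [ih _ _ hs']
    rw [sumRun_step xs hs, sumRun_cons]
    simp only [validSubarrays_alt, List.length_cons]
    push_cast
    ring

-- ===== VERDICT (by name: the statement is the Claim_ definition above) =====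
theorem validSubarrays_spec : Claim_equal_validSubarrays := by
  intro nums _
  show validSubarrays nums = validSubarrays_alt nums
  rw [validSubarrays, foldl_invariant nums 0 [] List.Pairwise.nil]
  simp [sumRun]
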